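-- pv_equiv track=rewrite | github.com/hersheleh/algorithms | python/problems/calculate_trash_run.py | calculate_trash
-- ===== SOURCE A (Python) =====
-- def calculate_trash(trash_type, D, T):
--     """Collect Trash."""
--     trip_total = 0
--     track_all_houses = False
--     for i in reversed(range(len(D))):                 # for each house
--         trash = T[i]
--         trash_count = 0
--         for bag in trash:      # for each bag
--             if bag == trash_type:
--                 trash_count += 1
--                 track_all_houses = True
--         if track_all_houses:
--             trip_total += D[i] * 2 + trash_count
--     return trip_total
-- ===== SOURCE B (Python) =====
-- def calculate_trash(trash_type, D, T):
--     counts = [T[i].count(trash_type) for i in range(len(D))]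
--     farthest = -1
--     for i, c in enumerate(counts):
--         if c:
--             farthest = i
--     return sum(D[i] * 2 + counts[i] for i in range(farthest + 1))
-- ===== Notes on version B (the rewrite author's own statement) =====
-- stated objective: simpler
-- what changed: Replaces the reverse scan with a sticky track_all_houses flag by a three-step decomposition: build a per-house count table, locate the farthest house with trash, then sum trip costs forward up to it.
import Mathlib
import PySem

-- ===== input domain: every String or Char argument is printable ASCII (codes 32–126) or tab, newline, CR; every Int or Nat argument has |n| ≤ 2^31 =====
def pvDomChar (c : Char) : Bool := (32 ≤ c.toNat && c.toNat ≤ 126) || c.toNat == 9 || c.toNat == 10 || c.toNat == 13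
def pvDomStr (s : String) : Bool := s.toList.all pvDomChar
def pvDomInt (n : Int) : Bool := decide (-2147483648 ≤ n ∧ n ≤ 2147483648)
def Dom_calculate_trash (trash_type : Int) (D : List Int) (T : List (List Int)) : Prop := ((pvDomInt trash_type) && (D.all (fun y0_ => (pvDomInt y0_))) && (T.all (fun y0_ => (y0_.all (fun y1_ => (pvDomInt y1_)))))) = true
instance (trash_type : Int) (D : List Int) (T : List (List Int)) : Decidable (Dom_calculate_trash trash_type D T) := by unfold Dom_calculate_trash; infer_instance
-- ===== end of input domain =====

-- B replaces A's reverse scan with a sticky flag by a simpler decomposition: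
-- count table, locate farthest house with trash, forward sum (same totals, same cost).

-- ===== PORT A =====
-- one step of A's outer loop (the inner bag loop is the literal fold inside)
def stepA (trash_type : Int) (D : List Int) (T : List (List Int)) (st : Int × Bool) (i : Nat) : Int × Bool :=
  let trash := T.getD i []
  let inner := trash.foldl (fun (p : Int × Bool) bag => if bag = trash_type then (p.1 + 1, true) else p) (0, st.2)
  (if inner.2 then st.1 + (D.getD i 0) * 2 + inner.1 else st.1, inner.2)

def calculate_trash (trash_type : Int) (D : List Int) (T : List (List Int)) : Int :=
  ((List.range D.length).reverse.foldl (stepA trash_type D T) (0, false)).1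

-- ===== PORT B =====
def calculate_trash_alt (trash_type : Int) (D : List Int) (T : List (List Int)) : Int :=
  let counts : List Int := (List.range D.length).map (fun i => ((T.getD i []).count trash_type : Int))
  let farthest : Int := (PySem.List.enumerate counts).foldl (fun (m : Int) (p : Int × Int) => if p.2 ≠ 0 then p.1 else m) (-1)
  (List.range (farthest + 1).toNat).foldl (fun s i => s + (D.getD i 0) * 2 + counts.getD i 0) 0

-- ===== PRECONDITION & SPEC =====
-- A indexes T[i] for every i < len(D), so it raises IndexError when len(T) < len(D); excluded.
def Pre_calculate_trash (trash_type : Int) (D : List Int) (T : List (List Int)) : Prop :=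
  D.length ≤ T.length
instance (trash_type : Int) (D : List Int) (T : List (List Int)) : Decidable (Pre_calculate_trash trash_type D T) := by unfold Pre_calculate_trash; infer_instance
def pvWitness_calculate_trash : Int × List Int × List (List Int) := (1, [2, 3], [[1], [0, 1]])

def Spec_calculate_trash (trash_type : Int) (D : List Int) (T : List (List Int)) (out : Int) : Prop := out = calculate_trash_alt trash_type D T
instance (trash_type : Int) (D : List Int) (T : List (List Int)) (out : Int) : Decidable (Spec_calculate_trash trash_type D T out) := by unfold Spec_calculate_trash; infer_instance

-- ===== CLAIM (what is proved, stated in full; the proofs are below) =====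
def Claim_equal_calculate_trash : Prop := ∀ (trash_type : Int) (D : List Int) (T : List (List Int)), Dom_calculate_trash trash_type D T → Pre_calculate_trash trash_type D T → Spec_calculate_trash trash_type D T (calculate_trash trash_type D T)

-- ===== LEMMAS AND PROOFS =====

-- the per-house count, and recursive versions of total / farthest / result
def cntF (t : Int) (T : List (List Int)) (i : Nat) : Int := ((T.getD i []).count t : Int)

def totF (t : Int) (D : List Int) (T : List (List Int)) : Nat → Int
  | 0 => 0
  | n+1 => totF t D T n + ((D.getD n 0) * 2 + cntF t T n)

def FF (t : Int) (T : List (List Int)) : Nat → Int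
  | 0 => -1
  | n+1 => if cntF t T n ≠ 0 then (n : Int) else FF t T n

def resF (t : Int) (D : List Int) (T : List (List Int)) : Nat → Int
  | 0 => 0
  | n+1 => if cntF t T n ≠ 0 then totF t D T (n+1) else resF t D T n

theorem innerFold (t : Int) (l : List Int) : ∀ (acc : Int) (b : Bool),
    l.foldl (fun (p : Int × Bool) bag => if bag = t then (p.1 + 1, true) else p) (acc, b)
      = (acc + (l.count t : Int), b || decide (0 < l.count t)) := by
  induction l with
  | nil => intro acc b; simp
  | cons x xs ih =>
    intro acc b
    by_cases hx : x = t
    · subst hx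
      rw [List.foldl_cons, if_pos rfl, ih]
      have : List.count x (x :: xs) = List.count x xs + 1 := by simp [List.count_cons]
      rw [this]
      refine Prod.ext ?_ ?_
      · simp; push_cast; ring
      · simp
    · rw [List.foldl_cons, if_neg hx, ih]
      have : List.count t (x :: xs) = List.count t xs := by simp [List.count_cons, hx]
      rw [this]

theorem stepA_eq (t : Int) (D : List Int) (T : List (List Int)) (st : Int × Bool) (i : Nat) :
    stepA t D T st i =
      (if st.2 || decide (0 < (T.getD i []).count t)
        then st.1 + (D.getD i 0) * 2 + cntF t T i else st.1,
       st.2 || decide (0 < (T.getD i []).count t)) := by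
  simp [stepA, innerFold, cntF]

theorem FF_lb (t : Int) (T : List (List Int)) : ∀ n : Nat, -1 ≤ FF t T n ∧ FF t T n < (n : Int) := by
  intro n
  induction n with
  | zero => simp [FF]
  | succ m ih => simp only [FF]; split <;> push_cast <;> omega

theorem Afold_true (t : Int) (D : List Int) (T : List (List Int)) : ∀ (n : Nat) (s : Int),
    (List.range n).reverse.foldl (stepA t D T) (s, true) = (s + totF t D T n, true) := by
  intro n
  induction n with
  | zero => intro s; simp [totF]
  | succ m ih =>
    intro s
    rw [List.range_succ]
    simp only [List.reverse_append, List.reverse_cons, List.reverse_nil, List.nil_append,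
      List.cons_append, List.foldl_cons, List.nil_append]
    rw [stepA_eq]
    simp only [Bool.true_or, if_pos trivial, if_true]
    rw [ih]
    refine Prod.ext ?_ rfl
    simp [totF]; ring
  
theorem Afold_false (t : Int) (D : List Int) (T : List (List Int)) : ∀ (n : Nat) (s : Int),
    (List.range n).reverse.foldl (stepA t D T) (s, false) = (s + resF t D T n, decide (FF t T n ≠ -1)) := by
  intro n
  induction n with
  | zero => intro s; simp [resF, FF]
  | succ m ih =>
    intro s
    rw [List.range_succ]
    simp only [List.reverse_append, List.reverse_cons, List.reverse_nil, List.nil_append,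
      List.cons_append, List.foldl_cons, List.nil_append]
    rw [stepA_eq]
    simp only [Bool.false_or]
    by_cases h : 0 < (T.getD m []).count t
    · rw [decide_eq_true h]
      simp only [Bool.or_true, if_pos trivial, if_true]
      rw [Afold_true]
      have hc : cntF t T m ≠ 0 := by unfold cntF; omega
      refine Prod.ext ?_ ?_
      · simp [resF, hc, totF]; ring
      · have : FF t T (m + 1) = (m : Int) := by simp [FF, hc]
        rw [this]; symm; simp only [decide_eq_true_eq]; omega
    · rw [decide_eq_false h]
      simp only [Bool.or_false, if_neg (by simp : ¬ (false : Bool) = true)]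
      rw [ih]
      have hc : cntF t T m = 0 := by unfold cntF; omega
      simp [resF, FF, hc]

theorem calculate_trash_eq_resF (t : Int) (D : List Int) (T : List (List Int)) :
    calculate_trash t D T = resF t D T D.length := by
  unfold calculate_trash
  rw [Afold_false]
  simp

theorem counts_getD (f : Nat → Int) (n i : Nat) (h : i < n) :
    ((List.range n).map f).getD i 0 = f i := by
  simp [List.getD, List.getElem?_map, List.getElem?_range, h]

theorem farthest_eq (t : Int) (T : List (List Int)) : ∀ n : Nat,
    (PySem.List.enumerate ((List.range n).map (fun i => ((T.getD i []).count t : Int)))).foldl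
      (fun (m : Int) (p : Int × Int) => if p.2 ≠ 0 then p.1 else m) (-1) = FF t T n := by
  intro n
  induction n with
  | zero => simp [FF, PySem.List.enumerate]
  | succ m ih =>
    rw [List.range_succ, List.map_append, PySem.List.enumerate_append]
    simp only [List.length_map, List.length_range, List.map_cons, List.map_nil]
    rw [List.foldl_append, ih]
    simp only [PySem.List.enumerate, List.foldl_cons, List.foldl_nil]
    have hcnt : ((T.getD m []).count t : Int) = cntF t T m := rfl
    rw [hcnt]
    by_cases h : cntF t T m = 0
    · simp [FF, h]
    · simp [FF, h]

theorem sumFold (D : List Int) (counts : List Int) (c : Nat → Int)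
    (hc : ∀ i, i < counts.length → counts.getD i 0 = c i)
    (t : Int) (T : List (List Int))
    (hcc : ∀ i, c i = cntF t T i) :
    ∀ (m : Nat), m ≤ counts.length → ∀ (s : Int),
      (List.range m).foldl (fun s i => s + (D.getD i 0) * 2 + counts.getD i 0) s = s + totF t D T m := by
  intro m
  induction m with
  | zero => intro _ s; simp [totF]
  | succ k ih =>
    intro hm s
    rw [List.range_succ, List.foldl_append]
    rw [ih (by omega)]
    simp only [List.foldl_cons, List.foldl_nil]
    rw [hc k (by omega), hcc k]
    simp [totF]; ring

theorem resF_eq_totF (t : Int) (D : List Int) (T : List (List Int)) : ∀ n : Nat,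
    resF t D T n = totF t D T ((FF t T n + 1).toNat) := by
  intro n
  induction n with
  | zero => simp [resF, FF, totF]
  | succ m ih =>
    by_cases h : cntF t T m = 0
    · simp [resF, FF, h, ih]
    · have hFF : FF t T (m + 1) = (m : Int) := by simp [FF, h]
      have hres : resF t D T (m + 1) = totF t D T (m + 1) := by simp [resF, h]
      rw [hres, hFF]
      have hteq : ((m : Int) + 1).toNat = m + 1 := by omega
      rw [hteq]

theorem calculate_trash_tight_lemma (t : Int) (D : List Int) (T : List (List Int)) :
    calculate_trash_alt t D T = resF t D T D.length := by
  unfold calculate_trash_alt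
  simp only []
  rw [farthest_eq]
  have hlb := FF_lb t T D.length
  rw [sumFold D _ (fun i => ((T.getD i []).count t : Int))
        (by intro i hi; rw [counts_getD]; simpa using hi)
        t T (by intro i; rfl)
        ((FF t T D.length + 1).toNat)
        (by simp; omega) 0]
  rw [resF_eq_totF]
  simp

-- ===== VERDICT (by name: the statement is the Claim_ definition above) =====
theorem calculate_trash_spec : Claim_equal_calculate_trash := by
  intro t D T _ _
  unfold Spec_calculate_trash
  rw [calculate_trash_eq_resF, calculate_trash_tight_lemma]
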